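-- pv_equiv track=rewrite | github.com/yangjianwei12/yang | rdp/charger_case_comms_stm32/build.py | s0
-- ===== SOURCE A (Python) =====
-- def byte_swap_32(x):
--     return ((x & 0x000000FF) << 24) + \
--         ((x & 0x0000FF00) << 8) + \
--         ((x & 0x00FF0000) >> 8) + \
--         ((x & 0xFF000000) >> 24)
--
-- def s0(csum_a, csum_b, variant):
--
--     # Address.
--     r = '0000'
--
--     # Payload.
--     r += '{0:0{1}X}'.format(byte_swap_32(csum_a), 8)
--     r += '{0:0{1}X}'.format(byte_swap_32(csum_b), 8)
--
--     vlen = len(variant)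
--     for n in range(7):
--         if n < vlen:
--             r += variant[n].encode('utf-8').hex()
--         else:
--             r += '00'
--     r += '00'
--
--     # Length.
--     rlen = len(r)
--     r = '{0:0{1}X}'.format(int(rlen / 2) + 1, 2) +  r
--
--     # Checksum.
--     csum = 0
--     for n in range(0, rlen + 2, 2):
--         csum += int(r[n:n+2], 16)
--     csum = ((csum ^ 0xFF) & 0xFF)
--     r += '{0:0{1}X}'.format(csum, 2)
--
--     return 'S0' + r
-- ===== SOURCE B (Python) =====
-- # B: build the record as bytes and sum them for the checksum, instead of building a
-- # hex string and re-parsing it two characters at a time.  A renders the numeric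
-- # fields in uppercase but the variant bytes via bytes.hex() in lowercase; the
-- # head/data split preserves exactly that.
-- def byte_swap_32(x):
--     return ((x & 0x000000FF) << 24) + \
--         ((x & 0x0000FF00) << 8) + \
--         ((x & 0x00FF0000) >> 8) + \
--         ((x & 0xFF000000) >> 24)
--
-- def s0(csum_a, csum_b, variant):
--     head = bytes(2) + byte_swap_32(csum_a).to_bytes(4, 'big') \
--                     + byte_swap_32(csum_b).to_bytes(4, 'big')
--     data = variant[:7].encode('utf-8').ljust(7, b'\x00') + b'\x00'
--     length = len(head) + len(data) + 1
--     csum = ((length + sum(head) + sum(data)) ^ 0xFF) & 0xFF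
--     return 'S0' + '{:02X}'.format(length) + head.hex().upper() + data.hex() \
--                 + '{:02X}'.format(csum)
-- ===== Notes on version B (the rewrite author's own statement) =====
-- stated objective: simpler
-- what changed: B assembles the 19 record bytes as byte strings (head/data) and sums them once for the checksum, instead of A's building a hex string piecewise and then re-parsing it two characters at a time with int(...,16); the length is a byte count rather than half a string length.
import Mathlib
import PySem

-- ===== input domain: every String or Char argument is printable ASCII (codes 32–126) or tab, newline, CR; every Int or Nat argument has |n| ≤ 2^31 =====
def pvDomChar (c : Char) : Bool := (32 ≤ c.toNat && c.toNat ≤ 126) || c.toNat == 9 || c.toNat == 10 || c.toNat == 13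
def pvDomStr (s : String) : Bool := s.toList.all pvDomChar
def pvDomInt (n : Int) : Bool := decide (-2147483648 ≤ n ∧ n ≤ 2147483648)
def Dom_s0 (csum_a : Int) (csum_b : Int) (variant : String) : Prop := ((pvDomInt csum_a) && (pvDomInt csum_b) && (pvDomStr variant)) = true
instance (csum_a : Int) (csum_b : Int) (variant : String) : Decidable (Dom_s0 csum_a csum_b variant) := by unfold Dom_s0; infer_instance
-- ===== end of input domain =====

-- B builds the record as byte lists and sums them once for the checksum, instead of
-- A's building a hex string and re-parsing it two characters at a time (objective: simpler).

-- ===== PORT A =====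

-- module helper byte_swap_32 (Python << / >> / & are Lean <<< / >>> / PySem.Int.band)
def byteSwap32 (x : Int) : Int :=
  (PySem.Int.band x 0x000000FF) <<< (24 : Nat) +
  (PySem.Int.band x 0x0000FF00) <<< (8 : Nat) +
  (PySem.Int.band x 0x00FF0000) >>> (8 : Nat) +
  (PySem.Int.band x 0xFF000000) >>> (24 : Nat)

def hexDigitU (d : Nat) : Char := if d < 10 then Char.ofNat (48 + d) else Char.ofNat (55 + d)
def hexDigitL (d : Nat) : Char := if d < 10 then Char.ofNat (48 + d) else Char.ofNat (87 + d)

-- '{0:0{1}X}'.format(n, w): zero-padded minimum width w, uppercase; exact for n ≥ 0 (all uses here)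
def hexPadAux (n : Nat) (w : Nat) (acc : List Char) : List Char :=
  if n < 16 ∧ w ≤ 1 then hexDigitU n :: acc
  else hexPadAux (n / 16) (w - 1) (hexDigitU (n % 16) :: acc)
termination_by n + w
decreasing_by omega

-- one byte of bytes.hex() (lowercase)
def hexByteL (b : Nat) : List Char := [hexDigitL (b / 16), hexDigitL (b % 16)]

-- UTF-8 encoding of one code point (exact)
def utf8Bytes (n : Nat) : List Nat :=
  if n < 128 then [n]
  else if n < 2048 then [192 + n / 64, 128 + n % 64]
  else if n < 65536 then [224 + n / 4096, 128 + n / 64 % 64, 128 + n % 64]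
  else [240 + n / 262144, 128 + n / 4096 % 64, 128 + n / 64 % 64, 128 + n % 64]

-- variant[n].encode('utf-8').hex() (the none branch is unreachable: the loop checks n < len(variant))
def subscriptEncHex (v : String) (n : Int) : List Char :=
  match PySem.Str.pyGet? v n with
  | some c => (utf8Bytes c.toNat).flatMap hexByteL
  | none => []

def hexVal (c : Char) : Nat :=
  if 48 ≤ c.toNat ∧ c.toNat ≤ 57 then c.toNat - 48
  else if 97 ≤ c.toNat then c.toNat - 87 else c.toNat - 55

-- int(s, 16): exact for nonempty unsigned strings of hex digits (the only slices parsed here)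
def parseHex (cs : List Char) : Int := cs.foldl (fun a c => 16 * a + (hexVal c : Int)) 0

def s0 (csum_a : Int) (csum_b : Int) (variant : String) : String :=
  -- r is kept as its code-point list (PySem string convention); byteSwap32 results are ≥ 0
  let r : List Char := ['0', '0', '0', '0']
  let r := r ++ hexPadAux (byteSwap32 csum_a).toNat 8 []
  let r := r ++ hexPadAux (byteSwap32 csum_b).toNat 8 []
  let vlen := PySem.Str.len variant
  let r := (PySem.List.pyRange 0 7 1).foldl (fun r n =>
      if n < vlen then r ++ subscriptEncHex variant n else r ++ ['0', '0']) r
  let r := r ++ ['0', '0']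
  let rlen := PySem.List.len r
  let r := hexPadAux (PySem.Int.floordiv rlen 2 + 1).toNat 2 [] ++ r  -- int(rlen/2) = floor for rlen ≥ 0
  let csum : Int := (PySem.List.pyRange 0 (rlen + 2) 2).foldl
      (fun csum n => csum + parseHex (PySem.List.slice r (some n) (some (n + 2)))) 0
  let csum := PySem.Int.band (PySem.Int.bxor csum 0xFF) 0xFF
  let r := r ++ hexPadAux csum.toNat 2 []                             -- csum ∈ [0, 255]
  String.ofList ('S' :: '0' :: r)

-- ===== PORT B =====

-- n.to_bytes(4, 'big'): exact for n < 2^32 (byteSwap32 never exceeds that)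
def be4 (n : Nat) : List Nat := [n / 16777216 % 256, n / 65536 % 256, n / 256 % 256, n % 256]

-- one byte of bytes.hex().upper()
def hexByteU (b : Nat) : List Char := [hexDigitU (b / 16), hexDigitU (b % 16)]

def s0_alt (csum_a : Int) (csum_b : Int) (variant : String) : String :=
  let head : List Nat := [0, 0] ++ be4 (byteSwap32 csum_a).toNat ++ be4 (byteSwap32 csum_b).toNat
  let enc := (variant.toList.take 7).flatMap (fun c => utf8Bytes c.toNat)  -- variant[:7].encode('utf-8')
  let data : List Nat := (enc ++ List.replicate (7 - enc.length) 0) ++ [0] -- .ljust(7, b'\x00') + b'\x00'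
  let length := head.length + data.length + 1
  let csum := ((length + head.sum + data.sum) ^^^ 255) &&& 255
  String.ofList (['S', '0'] ++ hexPadAux length 2 [] ++ head.flatMap hexByteU ++
                 data.flatMap hexByteL ++ hexPadAux csum 2 [])

-- ===== PRECONDITION & SPEC =====
def Spec_s0 (csum_a : Int) (csum_b : Int) (variant : String) (out : String) : Prop := out = s0_alt csum_a csum_b variant
instance (csum_a : Int) (csum_b : Int) (variant : String) (out : String) : Decidable (Spec_s0 csum_a csum_b variant out) := by unfold Spec_s0; infer_instance

-- ===== CLAIM (what is proved, stated in full; the proofs are below) =====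
def Claim_equal_s0 : Prop := ∀ (csum_a : Int) (csum_b : Int) (variant : String), Dom_s0 csum_a csum_b variant → Spec_s0 csum_a csum_b variant (s0 csum_a csum_b variant)

-- ===== LEMMAS AND PROOFS =====

theorem band_bounds (x m : Int) (hm : 0 ≤ m) : 0 ≤ PySem.Int.band x m ∧ PySem.Int.band x m ≤ m := by
  unfold PySem.Int.band
  split_ifs with h1
  · have := Nat.and_le_right (n := x.toNat) (m := m.toNat); omega
  · have := Nat.and_le_left (n := m.toNat) (m := (-x-1).toNat); omega

theorem byteSwap32_bounds (x : Int) : 0 ≤ byteSwap32 x ∧ byteSwap32 x < 4294967296 := by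
  unfold byteSwap32
  rw [Int.shiftLeft_eq, Int.shiftLeft_eq, Int.shiftRight_eq_div_pow, Int.shiftRight_eq_div_pow]
  have b1 := band_bounds x 0x000000FF (by norm_num)
  have b2 := band_bounds x 0x0000FF00 (by norm_num)
  have b3 := band_bounds x 0x00FF0000 (by norm_num)
  have b4 := band_bounds x 0xFF000000 (by norm_num)
  norm_num
  omega

theorem hexPadAux_step (n w : Nat) (acc : List Char) (h : ¬ w ≤ 1) :
    hexPadAux n w acc = hexPadAux (n / 16) (w - 1) (hexDigitU (n % 16) :: acc) := by
  rw [hexPadAux, if_neg (by omega)]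

theorem hexPadAux_one (n : Nat) (acc : List Char) (h : n < 16) :
    hexPadAux n 1 acc = hexDigitU n :: acc := by
  rw [hexPadAux, if_pos ⟨h, le_refl 1⟩]

theorem hexPad8 (n : Nat) (h : n < 4294967296) : hexPadAux n 8 [] = (be4 n).flatMap hexByteU := by
  rw [hexPadAux_step _ 8 _ (by omega), hexPadAux_step _ 7 _ (by omega), hexPadAux_step _ 6 _ (by omega),
      hexPadAux_step _ 5 _ (by omega), hexPadAux_step _ 4 _ (by omega), hexPadAux_step _ 3 _ (by omega),
      hexPadAux_step _ 2 _ (by omega), hexPadAux_one _ _ (by omega)]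
  simp only [be4, hexByteU, List.flatMap_cons, List.flatMap_nil, List.append_nil, List.cons_append,
    List.nil_append, List.cons.injEq, and_true]
  refine ⟨?_, ?_, ?_, ?_, ?_, ?_, ?_, ?_⟩ <;> exact congrArg _ (by omega)

theorem hexPad2 (b : Nat) (h : b < 256) : hexPadAux b 2 [] = hexByteU b := by
  rw [hexPadAux_step _ 2 _ (by omega), hexPadAux_one _ _ (by omega)]
  rfl

theorem hexVal_U (d : Nat) (h : d < 16) : hexVal (hexDigitU d) = d := by
  interval_cases d <;> decide

theorem hexVal_L (d : Nat) (h : d < 16) : hexVal (hexDigitL d) = d := by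
  interval_cases d <;> decide

theorem parseHex_U (b : Nat) (h : b < 256) : parseHex (hexByteU b) = b := by
  simp only [parseHex, hexByteU, List.foldl_cons, List.foldl_nil]
  rw [hexVal_U _ (by omega), hexVal_U _ (by omega)]; push_cast; omega

theorem parseHex_L (b : Nat) (h : b < 256) : parseHex (hexByteL b) = b := by
  simp only [parseHex, hexByteL, List.foldl_cons, List.foldl_nil]
  rw [hexVal_L _ (by omega), hexVal_L _ (by omega)]; push_cast; omega

theorem utf8_ascii (n : Nat) (h : n < 128) : utf8Bytes n = [n] := by simp [utf8Bytes, h]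

theorem enc_ascii (cs : List Char) (hv : ∀ c ∈ cs, c.toNat < 128) :
    cs.flatMap (fun c => utf8Bytes c.toNat) = cs.map (fun c => c.toNat) := by
  induction cs with
  | nil => rfl
  | cons c cs ih =>
    simp only [List.flatMap_cons, List.map_cons, utf8_ascii _ (hv c (by simp)),
      ih (fun x hx => hv x (by simp [hx])), List.singleton_append]

set_option maxHeartbeats 2000000 in
theorem varBlock (v : String) (hv : ∀ c ∈ v.toList, c.toNat < 128) :
    (PySem.List.pyRange 0 7 1).flatMap (fun n =>
      if n < ((v.toList.length : Nat) : Int) then subscriptEncHex v n else ['0', '0'])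
    = ((v.toList.take 7).map (fun c : Char => c.toNat) ++
        List.replicate (7 - ((v.toList.take 7).map (fun c : Char => c.toNat)).length) 0).flatMap hexByteL := by
  have hr : PySem.List.pyRange 0 7 1 = [0, 1, 2, 3, 4, 5, 6] := by
    rw [PySem.List.pyRange_one]
    norm_num [List.range_succ, show Int.toNat 7 = 7 from rfl]
  rw [hr]
  simp only [subscriptEncHex, PySem.Str.pyGet?_eq, PySem.Chars.pyGet?_eq_listPyGet?]
  generalize v.toList = cs at hv ⊢
  rcases cs with _ | ⟨c0, _ | ⟨c1, _ | ⟨c2, _ | ⟨c3, _ | ⟨c4, _ | ⟨c5, _ | ⟨c6, rest⟩⟩⟩⟩⟩⟩⟩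
  case nil => decide
  case cons.cons.cons.cons.cons.cons.cons =>
    have g0 : PySem.List.pyGet? (c0::c1::c2::c3::c4::c5::c6::rest) ((0:Nat):Int) = some ((c0::c1::c2::c3::c4::c5::c6::rest)[(0:Nat)]'(by simp)) := PySem.List.pyGet?_ofNat _ _ (by simp)
    have g1 : PySem.List.pyGet? (c0::c1::c2::c3::c4::c5::c6::rest) ((1:Nat):Int) = some ((c0::c1::c2::c3::c4::c5::c6::rest)[(1:Nat)]'(by simp)) := PySem.List.pyGet?_ofNat _ _ (by simp)
    have g2 : PySem.List.pyGet? (c0::c1::c2::c3::c4::c5::c6::rest) ((2:Nat):Int) = some ((c0::c1::c2::c3::c4::c5::c6::rest)[(2:Nat)]'(by simp)) := PySem.List.pyGet?_ofNat _ _ (by simp)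
    have g3 : PySem.List.pyGet? (c0::c1::c2::c3::c4::c5::c6::rest) ((3:Nat):Int) = some ((c0::c1::c2::c3::c4::c5::c6::rest)[(3:Nat)]'(by simp)) := PySem.List.pyGet?_ofNat _ _ (by simp)
    have g4 : PySem.List.pyGet? (c0::c1::c2::c3::c4::c5::c6::rest) ((4:Nat):Int) = some ((c0::c1::c2::c3::c4::c5::c6::rest)[(4:Nat)]'(by simp)) := PySem.List.pyGet?_ofNat _ _ (by simp)
    have g5 : PySem.List.pyGet? (c0::c1::c2::c3::c4::c5::c6::rest) ((5:Nat):Int) = some ((c0::c1::c2::c3::c4::c5::c6::rest)[(5:Nat)]'(by simp)) := PySem.List.pyGet?_ofNat _ _ (by simp)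
    have g6 : PySem.List.pyGet? (c0::c1::c2::c3::c4::c5::c6::rest) ((6:Nat):Int) = some ((c0::c1::c2::c3::c4::c5::c6::rest)[(6:Nat)]'(by simp)) := PySem.List.pyGet?_ofNat _ _ (by simp)
    norm_num at g0 g1 g2 g3 g4 g5 g6
    have hlen : ∀ k : Int, k ≤ 6 → k < ((c0::c1::c2::c3::c4::c5::c6::rest).length : Int) := by
      intro k hk; simp only [List.length_cons]; push_cast; omega
    simp_all [List.flatMap_cons, utf8_ascii, hexByteL]
  all_goals
    simp_all [PySem.List.pyGet?, PySem.List.pyIdx?, utf8_ascii, List.flatMap_cons, hexByteL]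
  all_goals decide

theorem pyRange_two_cons (a b : Int) (h : a < b) :
    PySem.List.pyRange a b 2 = a :: PySem.List.pyRange (a + 2) b 2 := by
  rw [PySem.List.pyRange_of_pos _ _ (by norm_num), PySem.List.pyRange_of_pos _ _ (by norm_num)]
  rw [if_pos h]
  have hN : ((b - a + 2 - 1) / 2).toNat = ((b - (a + 2) + 2 - 1) / 2).toNat + 1 := by omega
  rw [hN, List.range_succ_eq_map]
  simp only [List.map_cons, List.map_map, Nat.cast_zero, mul_zero, add_zero, List.cons.injEq, true_and]
  by_cases h2 : a + 2 < b
  · rw [if_pos h2]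
    apply List.map_congr_left; intro k _; simp [Function.comp]; ring
  · rw [if_neg h2]
    have : ((b - (a + 2) + 2 - 1) / 2).toNat = 0 := by omega
    simp [this]

theorem flatten_len2 {α : Type} (pre : List (List α)) (hp : ∀ b ∈ pre, b.length = 2) :
    pre.flatten.length = 2 * pre.length := by
  induction pre with
  | nil => simp
  | cons b bs ih =>
    simp only [List.flatten_cons, List.length_append, List.length_cons]
    rw [hp b (by simp), ih (fun x hx => hp x (by simp [hx]))]; ring

theorem foldSlices (f : List Char → Int) (blocks : List (List Char)) :
    ∀ (pre : List (List Char)), (∀ b ∈ blocks, b.length = 2) → (∀ b ∈ pre, b.length = 2) → ∀ (acc : Int),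
    (PySem.List.pyRange (2 * (pre.length : Int)) (2 * (pre.length : Int) + 2 * (blocks.length : Int)) 2).foldl
      (fun a n => a + f (PySem.List.slice (pre.flatten ++ blocks.flatten) (some n) (some (n + 2)))) acc
    = acc + (blocks.map f).sum := by
  induction blocks with
  | nil =>
    intro pre _ _ acc
    rw [PySem.List.pyRange_of_pos _ _ (by norm_num)]
    simp
  | cons b bs ih =>
    intro pre hb hp acc
    have hbl : b.length = 2 := hb b (by simp)
    rw [pyRange_two_cons _ _ (by simp only [List.length_cons]; push_cast; omega)]
    simp only [List.foldl_cons]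
    have hslice : PySem.List.slice (pre.flatten ++ (b :: bs).flatten) (some (2 * (pre.length : Int)))
        (some (2 * (pre.length : Int) + 2)) = b := by
      rw [PySem.List.slice_toNat _ (by positivity) (by positivity)]
      have h1 : (2 * (pre.length : Int)).toNat = pre.flatten.length := by
        rw [flatten_len2 pre hp]; omega
      have h2 : (2 * (pre.length : Int) + 2).toNat = pre.flatten.length + 2 := by
        rw [flatten_len2 pre hp]; omega
      rw [h1, h2, List.drop_left]
      simp only [List.flatten_cons, Nat.add_sub_cancel_left]
      rw [List.take_append_of_le_length (by omega), ← hbl, List.take_length]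
    rw [hslice]
    have e1 : pre.flatten ++ (b :: bs).flatten = (pre ++ [b]).flatten ++ bs.flatten := by simp
    rw [e1]
    have e2 : (2 * (pre.length : Int) + 2) = 2 * (((pre ++ [b]).length : Nat) : Int) := by
      simp only [List.length_append, List.length_cons, List.length_nil]; push_cast; ring
    have e3 : 2 * (pre.length : Int) + 2 * (((b :: bs).length : Nat) : Int)
        = 2 * (((pre ++ [b]).length : Nat) : Int) + 2 * ((bs.length : Nat) : Int) := by
      simp only [List.length_append, List.length_cons, List.length_nil]; push_cast; ring
    rw [e2, e3, ih (pre ++ [b]) (fun x hx => hb x (List.mem_cons_of_mem _ hx))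
        (by intro x hx; rcases List.mem_append.1 hx with h | h
            · exact hp x h
            · simp at h; subst h; exact hbl) (acc + f b)]
    simp only [List.map_cons, List.sum_cons]; ring

theorem foldSlices0 (f : List Char → Int) (blocks : List (List Char)) (hb : ∀ b ∈ blocks, b.length = 2)
    (N : Int) (hN : N = 2 * (blocks.length : Int)) (full : List Char) (hfull : full = blocks.flatten) :
    (PySem.List.pyRange 0 N 2).foldl
      (fun a n => a + f (PySem.List.slice full (some n) (some (n + 2)))) 0
    = (blocks.map f).sum := by
  subst hN hfull
  have := foldSlices f blocks [] hb (by simp) 0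
  simpa using this

theorem flatMapLen2 (f : Nat → List Char) (hf : ∀ b, (f b).length = 2) (bs : List Nat) :
    (bs.flatMap f).length = 2 * bs.length := by
  induction bs with
  | nil => rfl
  | cons b bs ih => simp [List.flatMap_cons, hf, ih]; ring

theorem mapParse_U (bs : List Nat) (h : ∀ b ∈ bs, b < 256) :
    ((bs.map hexByteU).map parseHex).sum = ((bs.sum : Nat) : Int) := by
  induction bs with
  | nil => rfl
  | cons b bs ih =>
    simp only [List.map_cons, List.sum_cons, parseHex_U b (h b (by simp)),
      ih (fun x hx => h x (by simp [hx]))]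
    push_cast; ring

theorem mapParse_L (bs : List Nat) (h : ∀ b ∈ bs, b < 256) :
    ((bs.map hexByteL).map parseHex).sum = ((bs.sum : Nat) : Int) := by
  induction bs with
  | nil => rfl
  | cons b bs ih =>
    simp only [List.map_cons, List.sum_cons, parseHex_L b (h b (by simp)),
      ih (fun x hx => h x (by simp [hx]))]
    push_cast; ring

-- ===== VERDICT (by name: the statement is the Claim_ definition above) =====
theorem s0_spec : Claim_equal_s0 := by
  unfold Claim_equal_s0 Spec_s0
  intro ca cb v hdom
  have hv : ∀ c ∈ v.toList, c.toNat < 128 := by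
    intro c hc
    unfold Dom_s0 pvDomStr at hdom
    simp only [Bool.and_eq_true, List.all_eq_true] at hdom
    have := hdom.2 c hc
    simp only [pvDomChar, Bool.or_eq_true, Bool.and_eq_true, decide_eq_true_eq, beq_iff_eq] at this
    omega
  obtain ⟨hA0, hA1⟩ := byteSwap32_bounds ca
  obtain ⟨hB0, hB1⟩ := byteSwap32_bounds cb
  have hn1 : (byteSwap32 ca).toNat < 4294967296 := by omega
  have hn2 : (byteSwap32 cb).toNat < 4294967296 := by omega
  simp only [s0, s0_alt]
  rw [hexPad8 _ hn1, hexPad8 _ hn2]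
  have hfold : ∀ init : List Char,
      List.foldl (fun r n => if n < PySem.Str.len v then r ++ subscriptEncHex v n else r ++ ['0','0']) init
        (PySem.List.pyRange 0 7 1)
      = init ++ ((v.toList.take 7).map (fun c : Char => c.toNat) ++
          List.replicate (7 - ((v.toList.take 7).map (fun c : Char => c.toNat)).length) 0).flatMap hexByteL := by
    intro init
    have hb : (fun (r : List Char) (n : Int) => if n < PySem.Str.len v then r ++ subscriptEncHex v n else r ++ ['0','0'])
        = fun r n => r ++ (if n < PySem.Str.len v then subscriptEncHex v n else ['0','0']) := by
      funext r n; split <;> rfl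
    rw [hb, PySem.List.foldl_append_eq_flatMap]
    simp only [PySem.Str.len_eq]
    exact congrArg _ (varBlock v hv)
  rw [hfold]
  set D := List.map (fun c : Char => c.toNat) (List.take 7 v.toList) with hD
  have hDle : D.length ≤ 7 := by simp [hD]
  have hDlt : ∀ b ∈ D, b < 256 := by
    intro b hb; rw [hD] at hb; simp only [List.mem_map] at hb
    obtain ⟨c, hc, rfl⟩ := hb
    exact lt_trans (hv c (List.mem_of_mem_take hc)) (by norm_num)
  set P := D ++ List.replicate (7 - D.length) 0 with hP
  have hPlen : P.length = 7 := by rw [hP]; simp; omega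
  have hPlt : ∀ b ∈ P, b < 256 := by
    intro b hb; rw [hP] at hb; rcases List.mem_append.1 hb with h | h
    · exact hDlt b h
    · have := List.eq_of_mem_replicate h; omega
  set R := ['0','0','0','0'] ++ List.flatMap hexByteU (be4 (byteSwap32 ca).toNat) ++
      List.flatMap hexByteU (be4 (byteSwap32 cb).toNat) ++ List.flatMap hexByteL P ++ ['0','0'] with hR
  have hbe4 : ∀ n, (be4 n).length = 4 := fun n => rfl
  have hRlen : R.length = 36 := by
    rw [hR]
    simp only [flatMapLen2 hexByteU (fun _ => rfl), flatMapLen2 hexByteL (fun _ => rfl), hbe4, hPlen,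
      List.length_append, List.length_cons, List.length_nil]
  have hlen36 : PySem.List.len R = ((36 : Nat) : Int) := by rw [PySem.List.len_eq, hRlen]
  rw [hlen36]
  have hfd : (PySem.Int.floordiv ((36 : Nat) : Int) 2 + 1).toNat = 19 := by
    rw [PySem.Int.floordiv_eq_ediv_of_pos (by norm_num)]; norm_num; decide
  rw [hfd, hexPad2 19 (by norm_num)]
  set B1 := [19, 0, 0] ++ be4 (byteSwap32 ca).toNat ++ be4 (byteSwap32 cb).toNat with hB1def
  set BLK := B1.map hexByteU ++ (P ++ [0]).map hexByteL with hBLK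
  have hblen : ∀ b ∈ BLK, b.length = 2 := by
    intro b hb
    rw [hBLK] at hb
    rcases List.mem_append.1 hb with h | h <;>
      · obtain ⟨x, _, rfl⟩ := List.mem_map.1 h; rfl
  have hBLKlen : BLK.length = 19 := by
    rw [hBLK, hB1def]
    simp only [List.length_append, List.length_map, List.length_cons, List.length_nil, hbe4, hPlen]
  have hN : ((36 : Nat) : Int) + 2 = 2 * (BLK.length : Int) := by rw [hBLKlen]; norm_num
  have hfull : hexByteU 19 ++ R = BLK.flatten := by
    rw [hBLK, hB1def, hR]
    simp only [List.map_append, List.flatten_append, ← List.flatMap_def, List.flatMap_cons,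
      List.flatMap_nil, List.append_assoc, List.append_nil]
    have h0U : hexByteU 0 = ['0', '0'] := rfl
    have h0L : hexByteL 0 = ['0', '0'] := rfl
    simp [h0U, h0L]
  rw [foldSlices0 parseHex BLK hblen _ hN _ hfull]
  have hsum : (BLK.map parseHex).sum = ((B1.sum + (P ++ [0]).sum : Nat) : Int) := by
    rw [hBLK]
    simp only [List.map_append, List.sum_append]
    rw [mapParse_U B1 (by
          intro b hb; rw [hB1def] at hb
          simp only [be4, List.mem_append, List.mem_cons, List.not_mem_nil, or_false] at hb
          rcases hb with ((rfl | rfl | rfl) | (rfl | rfl | rfl | rfl)) | (rfl | rfl | rfl | rfl) <;> omega),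
        mapParse_L P hPlt, mapParse_L [0] (by simp)]
    push_cast; ring
  rw [hsum]
  have hencB : (List.take 7 v.toList).flatMap (fun c => utf8Bytes c.toNat) = D := by
    rw [hD]; exact enc_ascii _ (fun c hc => hv c (List.mem_of_mem_take hc))
  rw [hencB, ← hP]
  have hblenB : ([0,0] ++ be4 (byteSwap32 ca).toNat ++ be4 (byteSwap32 cb).toNat).length + (P ++ [0]).length + 1 = 19 := by
    simp only [List.length_append, List.length_cons, List.length_nil, hbe4, hPlen]
  rw [hblenB, hexPad2 19 (by norm_num)]
  have hNeq : B1.sum + (P ++ [0]).sum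
      = 19 + ([0,0] ++ be4 (byteSwap32 ca).toNat ++ be4 (byteSwap32 cb).toNat).sum + (P ++ [0]).sum := by
    rw [hB1def]
    simp only [List.sum_append, List.sum_cons, List.sum_nil]
    omega
  have hcs : (PySem.Int.band (PySem.Int.bxor ((B1.sum + (P ++ [0]).sum : Nat) : Int) 255) 255).toNat
      = ((19 + ([0,0] ++ be4 (byteSwap32 ca).toNat ++ be4 (byteSwap32 cb).toNat).sum + (P ++ [0]).sum) ^^^ 255) &&& 255 := by
    have e1 : PySem.Int.bxor ((B1.sum + (P ++ [0]).sum : Nat) : Int) 255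
        = (((B1.sum + (P ++ [0]).sum) ^^^ 255 : Nat) : Int) := by
      exact_mod_cast PySem.Int.bxor_natCast (B1.sum + (P ++ [0]).sum) 255
    have e2 : PySem.Int.band (((B1.sum + (P ++ [0]).sum) ^^^ 255 : Nat) : Int) 255
        = ((((B1.sum + (P ++ [0]).sum) ^^^ 255) &&& 255 : Nat) : Int) := by
      exact_mod_cast PySem.Int.band_natCast ((B1.sum + (P ++ [0]).sum) ^^^ 255) 255
    rw [e1, e2, Int.toNat_natCast, hNeq]
  rw [hcs]
  apply congrArg String.ofList
  rw [hR]
  have h0U : hexByteU 0 = ['0', '0'] := rfl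
  have h0L : hexByteL 0 = ['0', '0'] := rfl
  simp [List.flatMap_append, List.flatMap_cons, List.append_assoc, h0U, h0L]
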